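-- pv_equiv track=rewrite | github.com/hitheshsathian/Dubai-born-where-thou-OCaml- | assignment5/assignment5/src/assignment5.py | assoc_list
-- ===== SOURCE A (Python) =====
-- def assoc_list (l):
--     value = 0
--     accessory_l =[]
--     result_l = []
--     for x in l:
--         value = l.count(x)
--         accessory_l.append((x,value))
--     for i in accessory_l:
--             if i not in result_l:
--                 result_l.append(i)
--     return result_l
-- ===== SOURCE B (Python) =====
-- def assoc_list(l):
--     counts = {}
--     for x in l:
--         counts[x] = counts.get(x, 0) + 1
--     return list(counts.items())
-- ===== Notes on version B (the rewrite author's own statement) =====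
-- stated objective: faster
-- what changed: B counts all occurrences in a single pass with a dict (insertion order = first occurrence) and returns its items, replacing A's per-element l.count calls and list-membership deduplication of the pairs.
import Mathlib
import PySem

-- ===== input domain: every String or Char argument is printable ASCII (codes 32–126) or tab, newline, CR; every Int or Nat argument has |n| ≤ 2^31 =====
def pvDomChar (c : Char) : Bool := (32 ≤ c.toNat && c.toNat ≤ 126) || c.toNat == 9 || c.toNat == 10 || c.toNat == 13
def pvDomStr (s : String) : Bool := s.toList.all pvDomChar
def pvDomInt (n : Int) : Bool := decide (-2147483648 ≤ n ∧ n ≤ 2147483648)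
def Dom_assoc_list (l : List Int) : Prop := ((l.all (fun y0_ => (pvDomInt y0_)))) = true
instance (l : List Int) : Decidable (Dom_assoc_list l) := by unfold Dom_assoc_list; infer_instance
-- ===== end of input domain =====

-- B counts all occurrences in one dict pass and returns the dict's items (objective: faster).

-- ===== PORT A =====
def assoc_list (l : List Int) : List (Int × Int) :=
  -- value = 0; accessory_l = []; for x in l: value = l.count(x); accessory_l.append((x, value))
  let accessory_l : List (Int × Int) :=
    l.foldl (fun acc x => acc ++ [(x, (PySem.List.count l x : Int))]) []
  -- result_l = []; for i in accessory_l: if i not in result_l: result_l.append(i)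
  accessory_l.foldl (fun r i => if r.contains i then r else r ++ [i]) []

-- ===== PORT B =====
def assoc_list_alt (l : List Int) : List (Int × Int) :=
  -- counts = {}; for x in l: counts[x] = counts.get(x, 0) + 1
  let counts : PySem.Dict Int Int :=
    l.foldl (fun d x => d.insert x (d.getD x 0 + 1)) PySem.Dict.empty
  -- return list(counts.items())
  counts.items

-- ===== PRECONDITION & SPEC =====
def Spec_assoc_list (l : List Int) (out : List (Int × Int)) : Prop := out = assoc_list_alt l
instance (l : List Int) (out : List (Int × Int)) : Decidable (Spec_assoc_list l out) := by unfold Spec_assoc_list; infer_instance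

-- ===== CLAIM (what is proved, stated in full; the proofs are below) =====
def Claim_equal_assoc_list : Prop := ∀ (l : List Int), Dom_assoc_list l → Spec_assoc_list l (assoc_list l)

-- ===== LEMMAS AND PROOFS =====

-- membership of a tagged pair among tagged pairs is decided by the first component
lemma contains_map_pair (g : Int → Int) (s : List Int) (x : Int) :
    (s.map (fun y => (y, g y))).contains (x, g x) = s.contains x := by
  simp only [List.contains_eq_mem, List.mem_map, Prod.mk.injEq, decide_eq_decide]
  constructor
  · rintro ⟨y, hy, rfl, -⟩; exact hy
  · intro hx; exact ⟨x, hx, rfl, rfl⟩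

-- deduplicating the (x, g x) pairs is the same as deduplicating the x's and tagging afterwards
lemma dedup_map_pair (g : Int → Int) (xs s : List Int) :
    (xs.map (fun y => (y, g y))).foldl (fun r i => if r.contains i then r else r ++ [i])
        (s.map (fun y => (y, g y)))
    = (xs.foldl (fun s x => if s.contains x then s else s ++ [x]) s).map (fun y => (y, g y)) := by
  induction xs generalizing s with
  | nil => rfl
  | cons x xs ih =>
    simp only [List.map_cons, List.foldl_cons, contains_map_pair]
    by_cases h : s.contains x = true
    · rw [if_pos h, if_pos h]; exact ih s
    · rw [if_neg h, if_neg h]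
      have hrec := ih (s ++ [x])
      simp only [List.map_append, List.map_cons, List.map_nil] at hrec
      exact hrec

-- the element dedup loop builds exactly PySem.Set.ofList
lemma dedup_fold_eq_foldl_add (l : List Int) (s : List Int) :
    l.foldl (fun s x => if s.contains x then s else s ++ [x]) s = l.foldl PySem.Set.add s := by
  induction l generalizing s with
  | nil => rfl
  | cons x xs ih => simp only [List.foldl_cons, PySem.Set.add]; exact ih _

lemma dedup_fold_eq_ofList (l : List Int) :
    l.foldl (fun s x => if s.contains x then s else s ++ [x]) [] = PySem.Set.ofList l := by
  rw [PySem.Set.ofList_eq_foldl, dedup_fold_eq_foldl_add]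

-- ===== VERDICT (by name: the statement is the Claim_ definition above) =====
theorem assoc_list_spec : Claim_equal_assoc_list := by
  intro l _
  show assoc_list l = assoc_list_alt l
  unfold assoc_list assoc_list_alt
  rw [PySem.List.foldl_append_singleton_eq_map, PySem.Dict.foldl_insert_getD_add_one_eq_counter,
      PySem.Dict.items_counter]
  simp only [List.nil_append]
  have h := dedup_map_pair (fun x => (PySem.List.count l x : Int)) l []
  simp only [List.map_nil] at h
  rw [h, dedup_fold_eq_ofList]
  simp [PySem.List.count]
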